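-- pv_equiv track=rewrite | github.com/pombreda/python-nose | nose/plugins/plugintest.py | blankline_separated_blocks
-- ===== SOURCE A (Python) =====
-- def blankline_separated_blocks(text):
--     block = []
--     for line in text.splitlines(True):
--         block.append(line)
--         if not line.strip():
--             yield "".join(block)
--             block = []
--     if block:
--         yield "".join(block)
-- ===== SOURCE B (Python) =====
-- def blankline_separated_blocks(text):
--     lines = text.splitlines(True)
--     boundaries = [i for i in range(len(lines)) if not lines[i].strip()]
--     start = 0
--     for b in boundaries:
--         yield "".join(lines[start:b + 1])
--         start = b + 1
--     if start < len(lines):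
--         yield "".join(lines[start:])
-- ===== Notes on version B (the rewrite author's own statement) =====
-- stated objective: alternative
-- what changed: A accumulates lines one by one and flushes the accumulator at each blank line; B first collects the indices of all blank lines in one pass, then slices the line list between consecutive boundaries, joining each slice.
import Mathlib
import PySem

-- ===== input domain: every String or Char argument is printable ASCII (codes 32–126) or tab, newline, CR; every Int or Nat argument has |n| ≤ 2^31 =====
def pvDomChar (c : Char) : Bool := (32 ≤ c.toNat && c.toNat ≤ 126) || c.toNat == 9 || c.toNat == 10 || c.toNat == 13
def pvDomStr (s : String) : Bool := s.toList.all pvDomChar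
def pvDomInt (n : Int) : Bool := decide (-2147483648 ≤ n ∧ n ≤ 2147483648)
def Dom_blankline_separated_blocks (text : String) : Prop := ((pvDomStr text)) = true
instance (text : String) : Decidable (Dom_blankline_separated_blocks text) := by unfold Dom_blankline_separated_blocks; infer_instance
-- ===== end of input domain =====

-- B collects blank-line indices first and slices between boundaries instead of
-- A's accumulate-and-flush single pass; same O(n) cost (objective: alternative).
-- Both ports compare the LIST of values the Python generator yields.

-- ===== PORT A =====
-- hand port of str.splitlines(keepends=True): exact on the domain's line breaks \n, \r, \r\n
-- (shared preprocessing of the input; both Pythons call text.splitlines(True))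
def pvSplitKeep (acc : List Char) : List Char → List (List Char)
  | [] => if acc = [] then [] else [acc.reverse]
  | '\n' :: rest => (acc.reverse ++ ['\n']) :: pvSplitKeep [] rest
  | '\r' :: '\n' :: rest => (acc.reverse ++ ['\r', '\n']) :: pvSplitKeep [] rest
  | '\r' :: rest => (acc.reverse ++ ['\r']) :: pvSplitKeep [] rest
  | c :: rest => pvSplitKeep (c :: acc) rest

-- the for loop of A: block accumulator, flush on blank line, final flush
def pvGoA (block : List (List Char)) : List (List Char) → List String
  | [] => if block = [] then [] else [String.ofList block.flatten]
  | l :: ls =>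
      let block' := block ++ [l]
      if PySem.Chars.strip l = [] then String.ofList block'.flatten :: pvGoA [] ls
      else pvGoA block' ls

def blankline_separated_blocks (text : String) : List String :=
  pvGoA [] (pvSplitKeep [] text.toList)

-- ===== PORT B =====
-- the for loop over the boundary list: state is `start`, emits one slice per boundary,
-- then the trailing slice if start < len(lines)
def pvGoB (lines : List (List Char)) : List Nat → Nat → List String
  | [], start =>
      if start < lines.length then [String.ofList ((lines.drop start).flatten)] else []
  | b :: bs, start =>
      String.ofList (((lines.drop start).take (b + 1 - start)).flatten) :: pvGoB lines bs (b + 1)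

def blankline_separated_blocks_alt (text : String) : List String :=
  let lines := pvSplitKeep [] text.toList
  let boundaries := (List.range lines.length).filter
    (fun i => PySem.Chars.strip (lines.getD i []) = [])
  pvGoB lines boundaries 0

-- ===== PRECONDITION & SPEC =====
def Spec_blankline_separated_blocks (text : String) (out : List String) : Prop := out = blankline_separated_blocks_alt text
instance (text : String) (out : List String) : Decidable (Spec_blankline_separated_blocks text out) := by unfold Spec_blankline_separated_blocks; infer_instance

-- ===== CLAIM (what is proved, stated in full; the proofs are below) =====
def Claim_equal_blankline_separated_blocks : Prop := ∀ (text : String), Dom_blankline_separated_blocks text → Spec_blankline_separated_blocks text (blankline_separated_blocks text)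

-- ===== LEMMAS AND PROOFS =====

-- boundary indices of a line list
def pvBIdx (lines : List (List Char)) : List Nat :=
  (List.range lines.length).filter (fun i => PySem.Chars.strip (lines.getD i []) = [])

lemma pvBIdx_cons (l : List Char) (ls : List (List Char)) :
    pvBIdx (l :: ls) =
      (if PySem.Chars.strip l = [] then [0] else []) ++ (pvBIdx ls).map (· + 1) := by
  unfold pvBIdx
  simp [List.range_succ_eq_map, List.filter_cons, List.filter_map, Function.comp_def,
    Nat.succ_eq_add_one]
  split <;> simp <;> exact List.map_congr_left (fun x _ => rfl)

-- prepend a pending block to B's output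
def pvConsJoin (acc : List (List Char)) : List String → List String
  | [] => if acc = [] then [] else [String.ofList acc.flatten]
  | h :: t => String.ofList (acc.flatten ++ h.toList) :: t

lemma pvGoB_shift (l : List Char) (ls : List (List Char)) (bs : List Nat) (s : Nat) :
    pvGoB (l :: ls) (bs.map (· + 1)) (s + 1) = pvGoB ls bs s := by
  induction bs generalizing s with
  | nil => simp [pvGoB]
  | cons b bs ih =>
      simp only [List.map_cons, pvGoB, List.drop_succ_cons]
      have h : b + 1 + 1 - (s + 1) = b + 1 - s := by omega
      rw [h, ih]

lemma pvConsJoin_nil (r : List String) : pvConsJoin [] r = r := by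
  cases r <;> simp [pvConsJoin, String.ofList_toList]

lemma pvGoB_shift0 (l : List Char) (ls : List (List Char)) (bs : List Nat) :
    pvGoB (l :: ls) (bs.map (· + 1)) 0 = pvConsJoin [l] (pvGoB ls bs 0) := by
  cases bs with
  | nil =>
      cases ls with
      | nil => simp [pvGoB, pvConsJoin]
      | cons x xs => simp [pvGoB, pvConsJoin, String.toList_ofList]
  | cons b bs =>
      simp only [List.map_cons, pvGoB, List.drop_zero, pvGoB_shift, pvConsJoin]
      congr 1
      simp [List.take_succ_cons, String.toList_ofList]

lemma pvConsJoin_snoc (acc : List (List Char)) (l : List Char) (r : List String) :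
    pvConsJoin (acc ++ [l]) r = pvConsJoin acc (pvConsJoin [l] r) := by
  cases r with
  | nil => simp [pvConsJoin, String.toList_ofList]
  | cons h t => simp [pvConsJoin, String.toList_ofList]

lemma pvGoA_eq (ls : List (List Char)) :
    ∀ acc, pvGoA acc ls = pvConsJoin acc (pvGoB ls (pvBIdx ls) 0) := by
  induction ls with
  | nil =>
      intro acc
      simp [pvGoA, pvBIdx, pvGoB, pvConsJoin]
  | cons l ls ih =>
      intro acc
      rw [pvBIdx_cons]
      by_cases hb : PySem.Chars.strip l = []
      · have hB : pvGoB (l :: ls) (0 :: (pvBIdx ls).map (· + 1)) 0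
            = String.ofList l :: pvGoB ls (pvBIdx ls) 0 := by
          simp [pvGoB, pvGoB_shift]
        rw [if_pos hb, List.singleton_append, hB]
        simp only [pvConsJoin, String.toList_ofList]
        simp [pvGoA, hb, ih, pvConsJoin_nil]
      · simp only [hb]
        show pvGoA acc (l :: ls) =
          pvConsJoin acc (pvGoB (l :: ls) ((pvBIdx ls).map (· + 1)) 0)
        rw [pvGoB_shift0, ← pvConsJoin_snoc]
        simp [pvGoA, hb, ih]

-- ===== VERDICT (by name: the statement is the Claim_ definition above) =====
theorem blankline_separated_blocks_spec : Claim_equal_blankline_separated_blocks := by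
  intro text _
  show blankline_separated_blocks text = blankline_separated_blocks_alt text
  unfold blankline_separated_blocks blankline_separated_blocks_alt
  rw [pvGoA_eq]
  exact pvConsJoin_nil _
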